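-- pv_equiv track=rewrite | github.com/nuncprotunc/windsurf | scripts/compact_v2a.py | rebuild_back
-- ===== SOURCE A (Python) =====
-- from typing import Dict, List, Tuple
--
-- def rebuild_back(sections: Dict[str, List[str]], order: List[str]) -> str:
--     blocks = []
--     for h in order:
--         blocks.append(h)
--         if sections[h]:
--             blocks.extend(sections[h])
--         blocks.append("")  # blank line between sections
--     return "\n".join(blocks).rstrip() + "\n"
-- ===== SOURCE B (Python) =====
-- from typing import Dict, List
--
-- def rebuild_back(sections: Dict[str, List[str]], order: List[str]) -> str:
--     # Build the output back-to-front: walk the headers in reverse, keeping the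
--     # already-finished (and already right-stripped) suffix; the blank separator
--     # line is only inserted when a non-empty suffix follows, and the trailing
--     # strip happens incrementally while the suffix is still all-whitespace,
--     # so no final rstrip pass over the whole text is needed.
--     acc = ""
--     for h in reversed(order):
--         chunk = "\n".join([h] + sections[h])
--         if acc:
--             acc = chunk + "\n\n" + acc
--         else:
--             acc = chunk.rstrip()
--     return acc + "\n"
-- ===== Notes on version B (the rewrite author's own statement) =====
-- stated objective: alternative
-- what changed: B builds the output back-to-front: it folds over reversed(order), prepending each header's chunk to the finished suffix, inserting the blank separator only when a non-empty suffix follows and performing the trailing strip incrementally while the suffix is still all-whitespace, so the flat sentinel list, the global join and the final rstrip pass all disappear.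
import Mathlib
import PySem

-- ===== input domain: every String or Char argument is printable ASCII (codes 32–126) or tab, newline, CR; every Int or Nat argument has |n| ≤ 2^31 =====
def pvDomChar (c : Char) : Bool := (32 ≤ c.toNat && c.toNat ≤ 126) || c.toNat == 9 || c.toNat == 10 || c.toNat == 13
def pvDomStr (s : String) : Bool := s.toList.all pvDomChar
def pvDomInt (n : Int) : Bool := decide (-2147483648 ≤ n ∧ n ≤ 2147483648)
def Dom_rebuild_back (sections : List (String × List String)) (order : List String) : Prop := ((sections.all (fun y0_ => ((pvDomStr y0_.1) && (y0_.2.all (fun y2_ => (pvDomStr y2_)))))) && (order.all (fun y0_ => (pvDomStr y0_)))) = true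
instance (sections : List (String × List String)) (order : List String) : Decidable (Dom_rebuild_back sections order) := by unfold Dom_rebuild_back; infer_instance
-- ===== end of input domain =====

-- B builds the output back-to-front over reversed(order), prepending chunks to the
-- finished suffix and stripping trailing whitespace incrementally, so A's flat
-- sentinel list, global join and final rstrip pass disappear; objective: alternative (same cost).


-- ===== PORT A =====
def rebuild_back (sections : List (String × List String)) (order : List String) : String :=
  let d := PySem.Dict.mk sections
  let blocks : List String := order.foldl (fun blocks h =>
    let blocks := blocks ++ [h]                                      -- blocks.append(h)
    let blocks := if (d.getD h []) ≠ [] then blocks ++ d.getD h []   -- if sections[h]: blocks.extend(...)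
                  else blocks
    blocks ++ [""]) []                                               -- blocks.append("")
  PySem.Str.rstrip (PySem.Str.join "\n" blocks) ++ "\n"

-- ===== PORT B =====
def rebuild_back_alt (sections : List (String × List String)) (order : List String) : String :=
  let d := PySem.Dict.mk sections
  let acc : String := order.reverse.foldl (fun acc h =>              -- for h in reversed(order)
    let chunk := PySem.Str.join "\n" (h :: d.getD h [])              -- chunk = "\n".join([h] + sections[h])
    if acc ≠ "" then chunk ++ "\n\n" ++ acc                          -- if acc: acc = chunk + "\n\n" + acc
    else PySem.Str.rstrip chunk) ""                                  -- else:   acc = chunk.rstrip()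
  acc ++ "\n"                                                        -- return acc + "\n"

-- ===== PRECONDITION & SPEC =====
-- Pre_ excludes inputs on which Python A raises KeyError: every header of `order` must be a key of `sections`.
def Pre_rebuild_back (sections : List (String × List String)) (order : List String) : Prop :=
  ∀ h ∈ order, h ∈ sections.map Prod.fst
instance (sections : List (String × List String)) (order : List String) : Decidable (Pre_rebuild_back sections order) := by unfold Pre_rebuild_back; infer_instance
def pvWitness_rebuild_back : (List (String × List String)) × List String :=
  ([("Intro", ["line 1", "line 2"]), ("Body", [])], ["Body", "Intro"])

def Spec_rebuild_back (sections : List (String × List String)) (order : List String) (out : String) : Prop := out = rebuild_back_alt sections order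
instance (sections : List (String × List String)) (order : List String) (out : String) : Decidable (Spec_rebuild_back sections order out) := by unfold Spec_rebuild_back; infer_instance

-- ===== CLAIM (what is proved, stated in full; the proofs are below) =====
def Claim_equal_rebuild_back : Prop := ∀ (sections : List (String × List String)) (order : List String), Dom_rebuild_back sections order → Pre_rebuild_back sections order → Spec_rebuild_back sections order (rebuild_back sections order)

-- ===== LEMMAS AND PROOFS =====

-- the per-header chunk of A's block list (with the "" sentinel), and the '\n'-joined chunk, at List Char level
def pvBlk (d : PySem.Dict String (List String)) (h : String) : List (List Char) :=
  h.toList :: ((d.getD h []).map String.toList ++ [[]])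
def pvPart (d : PySem.Dict String (List String)) (h : String) : List Char :=
  PySem.Chars.join ['\n'] (h.toList :: (d.getD h []).map String.toList)
-- B's back-to-front step at List Char level
def pvStep (d : PySem.Dict String (List String)) (h : String) (acc : List Char) : List Char :=
  if acc ≠ [] then pvPart d h ++ ['\n', '\n'] ++ acc else PySem.Chars.rstrip (pvPart d h)

theorem pvWitness_ok :
    Dom_rebuild_back pvWitness_rebuild_back.1 pvWitness_rebuild_back.2 ∧
    Pre_rebuild_back pvWitness_rebuild_back.1 pvWitness_rebuild_back.2 := by
  constructor <;> decide

-- A's foldl builds exactly the flatMap of the per-header chunks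
theorem foldl_blocks (d : PySem.Dict String (List String)) (order : List String) (acc : List String) :
    order.foldl (fun blocks h =>
      (if (d.getD h []) ≠ [] then (blocks ++ [h]) ++ d.getD h [] else blocks ++ [h]) ++ [""]) acc
    = acc ++ order.flatMap (fun h => h :: (d.getD h [] ++ [""])) := by
  induction order generalizing acc with
  | nil => simp
  | cons h t ih =>
    simp only [List.foldl_cons, List.flatMap_cons, ih]
    by_cases hv : d.getD h [] = [] <;> simp [hv]

theorem join_append_sep (sep : List Char) (xs ys : List (List Char))
    (hx : xs ≠ []) (hy : ys ≠ []) :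
    PySem.Chars.join sep (xs ++ ys) = PySem.Chars.join sep xs ++ sep ++ PySem.Chars.join sep ys := by
  induction xs with
  | nil => exact absurd rfl hx
  | cons x xs ih =>
    cases xs with
    | nil =>
      obtain ⟨y, ys, rfl⟩ := List.exists_cons_of_ne_nil hy
      simp [PySem.Chars.join_cons_cons, PySem.Chars.join_singleton]
    | cons x2 xs2 =>
      have := ih (by simp)
      simp only [List.cons_append, PySem.Chars.join_cons_cons] at *
      simp [this, List.append_assoc]

-- rstrip distributes over append: strip the right part; if it vanishes, keep stripping the left
theorem rstrip_append (x y : List Char) :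
    PySem.Chars.rstrip (x ++ y)
    = if PySem.Chars.rstrip y = [] then PySem.Chars.rstrip x else x ++ PySem.Chars.rstrip y := by
  simp only [PySem.Chars.rstrip, List.reverse_append, List.dropWhile_append]
  by_cases hy : List.dropWhile PySem.Chars.isspace y.reverse = [] <;>
    simp [hy, List.isEmpty_iff]

theorem rstrip_newlines_nil : PySem.Chars.rstrip ['\n'] = [] ∧ PySem.Chars.rstrip ['\n', '\n'] = [] := by
  decide

-- join over one chunk (content ++ sentinel) = the joined content plus one '\n'
theorem join_pvBlk (d : PySem.Dict String (List String)) (h : String) :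
    PySem.Chars.join ['\n'] (pvBlk d h) = pvPart d h ++ ['\n'] := by
  have : pvBlk d h = (h.toList :: (d.getD h []).map String.toList) ++ [[]] := by simp [pvBlk]
  rw [this, join_append_sep _ _ _ (by simp) (by simp), PySem.Chars.join_singleton]
  simp [pvPart]

-- the heart: rstrip of A's single flat join = B's back-to-front fold
theorem rstrip_join_eq_foldr (d : PySem.Dict String (List String)) (order : List String) :
    PySem.Chars.rstrip (PySem.Chars.join ['\n'] (order.flatMap (pvBlk d)))
    = order.foldr (pvStep d) [] := by
  induction order with
  | nil => simp [PySem.Chars.rstrip]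
  | cons h t ih =>
    cases t with
    | nil =>
      rw [List.foldr_cons, List.flatMap_cons, List.flatMap_nil, List.append_nil, join_pvBlk,
          rstrip_append, rstrip_newlines_nil.1, if_pos rfl]
      simp [pvStep]
    | cons h2 t2 =>
      have hne : (h2 :: t2).flatMap (pvBlk d) ≠ [] := by simp [pvBlk]
      have hfm : ((h :: h2 :: t2).flatMap (pvBlk d)) = pvBlk d h ++ (h2 :: t2).flatMap (pvBlk d) := by
        rw [List.flatMap_cons]
      rw [List.foldr_cons, hfm, join_append_sep _ _ _ (by simp [pvBlk]) hne, join_pvBlk]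
      have hsplit : (pvPart d h ++ ['\n'] ++ ['\n'] ++ PySem.Chars.join ['\n'] ((h2 :: t2).flatMap (pvBlk d)))
          = pvPart d h ++ (['\n', '\n'] ++ PySem.Chars.join ['\n'] ((h2 :: t2).flatMap (pvBlk d))) := by
        simp [List.append_assoc]
      rw [hsplit, rstrip_append, rstrip_append, rstrip_newlines_nil.2, ← ih]
      generalize PySem.Chars.rstrip (PySem.Chars.join ['\n'] ((h2 :: t2).flatMap (pvBlk d))) = J
      by_cases hacc : J = []
      · simp [hacc, pvStep]
      · simp [hacc, pvStep, List.append_assoc]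

theorem ofList_eq_of_toList_eq {s t : String} (h : s.toList = t.toList) : s = t := by
  have := congrArg String.ofList h
  simpa using this

-- B's String-level back-to-front step
def pvStepS (d : PySem.Dict String (List String)) (h : String) (acc : String) : String :=
  if acc ≠ "" then PySem.Str.join "\n" (h :: d.getD h []) ++ "\n\n" ++ acc
  else PySem.Str.rstrip (PySem.Str.join "\n" (h :: d.getD h []))

-- B's String-level foldr computes pvStep's foldr, character-wise
theorem foldr_stepS (d : PySem.Dict String (List String)) (order : List String) :
    (order.foldr (pvStepS d) "").toList = order.foldr (pvStep d) [] := by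
  induction order with
  | nil => rfl
  | cons h t ih =>
    rw [List.foldr_cons, List.foldr_cons, pvStepS, pvStep]
    have hpart : (PySem.Str.join "\n" (h :: d.getD h [])).toList = pvPart d h := by
      rw [PySem.Str.toList_join]; simp [pvPart]
    by_cases hacc : (t.foldr (pvStepS d) "") = ""
    · have hc : t.foldr (pvStep d) [] = [] := by rw [← ih, hacc]; rfl
      rw [if_neg (by simp [hacc]), if_neg (by simp [hc]), PySem.Str.toList_rstrip, hpart]
    · have hc : t.foldr (pvStep d) [] ≠ [] := by
        rw [← ih]; intro hcon; exact hacc (ofList_eq_of_toList_eq (by simpa using hcon))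
      rw [if_pos hacc, if_pos hc, String.toList_append, String.toList_append, hpart, ih]
      congr 1

-- ===== VERDICT (by name: the statement is the Claim_ definition above) =====
theorem rebuild_back_spec : Claim_equal_rebuild_back := by
  intro sections order _ _
  show rebuild_back sections order = rebuild_back_alt sections order
  simp only [rebuild_back, rebuild_back_alt]
  generalize PySem.Dict.mk sections = d
  rw [List.foldl_reverse]
  have hstep : (order.foldr (fun h acc =>
      (fun acc h =>
        if acc ≠ "" then PySem.Str.join "\n" (h :: d.getD h []) ++ "\n\n" ++ acc
        else PySem.Str.rstrip (PySem.Str.join "\n" (h :: d.getD h []))) acc h) "")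
      = order.foldr (pvStepS d) "" := rfl
  rw [hstep]
  congr 1
  apply ofList_eq_of_toList_eq
  rw [PySem.Str.toList_rstrip, PySem.Str.toList_join, foldl_blocks d order [], List.nil_append]
  have hmap : ((order.flatMap (fun h => h :: (d.getD h [] ++ [""])))).map String.toList
      = order.flatMap (pvBlk d) := by
    rw [List.map_flatMap]
    have : (fun h => (h :: (d.getD h [] ++ [""])).map String.toList) = pvBlk d := by
      funext x; simp [pvBlk]
    rw [this]
  have hsep : String.toList "\n" = ['\n'] := by decide
  rw [hsep, hmap, rstrip_join_eq_foldr, foldr_stepS]
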